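-- pv_equiv track=rewrite | github.com/BioLJ/TransAC4C | util_funcs.py | generate_char_dict
-- ===== SOURCE A (Python) =====
-- import itertools
--
-- def generate_char_dict(letters, length):
--     combinations = itertools.product(letters, repeat=length)
--     char_dict = {}
--     for idx, combo in enumerate(combinations, start=1):
--         char = ''.join(combo)
--         if char not in char_dict:
--             char_dict[char] = []
--         char_dict[char].append(idx)
--
--     return char_dict
-- ===== SOURCE B (Python) =====
-- def generate_char_dict(letters, length):
--     k = len(letters)
--     # positions of each distinct letter (duplicate letters share a key)
--     pos = {}
--     for j, c in enumerate(letters):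
--         pos.setdefault(c, []).append(j)
--     # distinct words of the given length in first-appearance order, each paired
--     # with its 0-based ranks in the Cartesian enumeration, computed
--     # arithmetically as base-k numbers from the letter positions
--     words = [('', [0])]
--     for _ in range(length):
--         words = [(w + c, [b * k + j for b in bases for j in pos[c]])
--                  for (w, bases) in words for c in pos]
--     return {w: [b + 1 for b in bases] for (w, bases) in words}
-- ===== Notes on version B (the rewrite author's own statement) =====
-- stated objective: alternative
-- what changed: Instead of enumerating all k^n combinations with a global counter and grouping them into the dict, B never runs the product enumeration: it groups the positions of each distinct letter once, then builds only the DISTINCT words by prefix extension, computing each word's enumeration indices arithmetically as base-k numbers (b*k+j) from the letter positions, so no key ever collides and no lookup/grouping of enumerated items happens.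
import Mathlib
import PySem

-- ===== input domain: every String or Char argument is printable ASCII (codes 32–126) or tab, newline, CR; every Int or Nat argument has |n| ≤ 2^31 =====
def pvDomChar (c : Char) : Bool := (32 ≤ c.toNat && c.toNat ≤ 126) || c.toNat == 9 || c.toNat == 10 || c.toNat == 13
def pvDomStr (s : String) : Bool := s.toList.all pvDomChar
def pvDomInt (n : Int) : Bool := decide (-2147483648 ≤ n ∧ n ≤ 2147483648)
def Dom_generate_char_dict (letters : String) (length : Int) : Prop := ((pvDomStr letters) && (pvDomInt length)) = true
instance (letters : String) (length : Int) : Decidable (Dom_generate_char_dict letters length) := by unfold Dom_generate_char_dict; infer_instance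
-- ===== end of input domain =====

-- B replaces A's enumerate-the-full-product-and-group algorithm by a distinct-words DP:
-- letter positions are grouped once and each distinct word's enumeration indices are computed
-- arithmetically as base-k numbers (objective: alternative algorithm, same worst-case cost).

-- ===== PORT A =====
-- itertools.product(letters, repeat=n): first coordinate varies slowest, so the tuple list is
-- n-fold front-first extension of [()] (exact: product's documented ordering); iterated
-- tail-recursively so evaluation is a loop, like Python's lazy iterator.
def productStep (l : List Char) (ps : List (List Char)) : List (List Char) :=
  l.flatMap (fun c => ps.map (fun rest => c :: rest))

def pyProduct (l : List Char) : Nat → List (List Char) → List (List Char)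
  | 0, ps => ps
  | n + 1, ps => pyProduct l n (productStep l ps)

def generate_char_dict (letters : String) (length : Int) : List (String × List Int) :=
  let combinations := pyProduct letters.toList length.toNat [[]]
  ((PySem.List.enumerate combinations 1).foldl
    (fun (d : PySem.Dict String (List Int)) p =>
      let char := String.ofList p.2
      let d := if d.contains char = false then d.insert char [] else d
      d.modify char [] (fun v => v ++ [p.1]))
    PySem.Dict.empty).items

-- ===== PORT B =====
-- pos.setdefault(c, []).append(j) mutates the stored list: as a dict value this is exactly
-- Dict.modify c [] (· ++ [j]).  Python string concatenation is carried as List Char append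
-- (exact), String.ofList applied where Source B forms the final dict keys.
def posDict (l : List Char) : PySem.Dict Char (List Int) :=
  (PySem.List.enumerate l 0).foldl (fun d p => d.modify p.2 [] (fun v => v ++ [p.1]))
    PySem.Dict.empty

def stepWords (ks : List Char) (pos : PySem.Dict Char (List Int)) (k : Int)
    (ws : List (List Char × List Int)) : List (List Char × List Int) :=
  ws.flatMap (fun wb => ks.map (fun c =>
    (wb.1 ++ [c], wb.2.flatMap (fun b => (pos.getD c []).map (fun j => b * k + j)))))

def wordsLoop (ks : List Char) (pos : PySem.Dict Char (List Int)) (k : Int) :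
    Nat → List (List Char × List Int) → List (List Char × List Int)
  | 0, ws => ws
  | n + 1, ws => wordsLoop ks pos k n (stepWords ks pos k ws)

def generate_char_dict_alt (letters : String) (length : Int) : List (String × List Int) :=
  let l := letters.toList
  let k : Int := l.length
  let pos := posDict l
  let ws := wordsLoop pos.keys pos k length.toNat [([], [0])]
  (ws.foldl (fun (d : PySem.Dict String (List Int)) wb =>
      d.insert (String.ofList wb.1) (wb.2.map (fun b => b + 1)))
    PySem.Dict.empty).items

-- ===== PRECONDITION & SPEC =====
-- A raises ValueError for length < 0 (itertools.product rejects a negative repeat): excluded.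
def Pre_generate_char_dict (letters : String) (length : Int) : Prop := 0 ≤ length
instance (letters : String) (length : Int) : Decidable (Pre_generate_char_dict letters length) := by unfold Pre_generate_char_dict; infer_instance

def pvWitness_generate_char_dict : String × Int := ("ab", 2)

def Spec_generate_char_dict (letters : String) (length : Int) (out : List (String × List Int)) : Prop := out = generate_char_dict_alt letters length
instance (letters : String) (length : Int) (out : List (String × List Int)) : Decidable (Spec_generate_char_dict letters length out) := by unfold Spec_generate_char_dict; infer_instance

-- ===== CLAIM (what is proved, stated in full; the proofs are below) =====
def Claim_equal_generate_char_dict : Prop := ∀ (letters : String) (length : Int), Dom_generate_char_dict letters length → Pre_generate_char_dict letters length → Spec_generate_char_dict letters length (generate_char_dict letters length)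

-- ===== LEMMAS AND PROOFS =====

def positionsFrom {α : Type} [DecidableEq α] (xs : List α) (w : α) (i : Int) : List Int :=
  match xs with
  | [] => []
  | x :: t => (if x = w then [i] else []) ++ positionsFrom t w (i + 1)

def extendAll (l : List Char) (ws : List (List Char)) : List (List Char) :=
  ws.flatMap (fun w => l.map (fun c => w ++ [c]))

def prodRec (l : List Char) : Nat → List (List Char)
  | 0 => [[]]
  | n + 1 => extendAll l (prodRec l n)

def pyProductRec (l : List Char) : Nat → List (List Char)
  | 0 => [[]]
  | n + 1 => productStep l (pyProductRec l n)

def canon (X : List (List Char)) : List (List Char × List Int) :=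
  (PySem.Set.ofList X).map (fun w => (w, positionsFrom X w 0))

theorem positionsFrom_shift {α : Type} [DecidableEq α] (xs : List α) (w : α) :
    ∀ i : Int, positionsFrom xs w i = (positionsFrom xs w 0).map (· + i) := by
  induction xs with
  | nil => intro i; simp [positionsFrom]
  | cons x t ih =>
    intro i
    simp only [positionsFrom, List.map_append]
    refine congrArg₂ (· ++ ·) ?_ ?_
    · split_ifs <;> simp
    · rw [ih (i + 1), ih (0 + 1)]
      simp only [List.map_map]
      congr 1; funext b; simp only [Function.comp]; omega

theorem positionsFrom_append {α : Type} [DecidableEq α] (xs ys : List α) (w : α) :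
    ∀ i : Int, positionsFrom (xs ++ ys) w i = positionsFrom xs w i ++ positionsFrom ys w (i + xs.length) := by
  induction xs with
  | nil => intro i; simp [positionsFrom]
  | cons x t ih =>
    intro i
    simp only [List.cons_append, positionsFrom, ih (i + 1), List.append_assoc, List.length_cons]
    congr 2
    push_cast
    ring_nf

theorem positionsFrom_not_mem {α : Type} [DecidableEq α] (xs : List α) (w : α) (hw : w ∉ xs) :
    ∀ i : Int, positionsFrom xs w i = [] := by
  induction xs with
  | nil => intro i; simp [positionsFrom]
  | cons x t ih =>
    intro i
    simp only [List.mem_cons, not_or] at hw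
    simp [positionsFrom, Ne.symm hw.1, ih hw.2]

theorem positionsFrom_map_ne {α β : Type} [DecidableEq α] [DecidableEq β] (f : α → β)
    (l : List α) (y : β) (hy : ∀ c, f c ≠ y) :
    ∀ i : Int, positionsFrom (l.map f) y i = [] := by
  induction l with
  | nil => intro i; simp [positionsFrom]
  | cons a t ih => intro i; simp [positionsFrom, hy a, ih]

theorem positionsFrom_map_inj {α β : Type} [DecidableEq α] [DecidableEq β] (f : α → β)
    (hf : Function.Injective f) (l : List α) (c : α) :
    ∀ i : Int, positionsFrom (l.map f) (f c) i = positionsFrom l c i := by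
  induction l with
  | nil => intro i; simp [positionsFrom]
  | cons a t ih => intro i; simp [positionsFrom, hf.eq_iff, ih]

theorem ofList_map_inj {α β : Type} [BEq α] [LawfulBEq α] [BEq β] [LawfulBEq β] (f : α → β)
    (hf : Function.Injective f) (l : List α) :
    PySem.Set.ofList (l.map f) = (PySem.Set.ofList l).map f := by
  induction l using List.reverseRecOn with
  | nil => simp [PySem.Set.ofList_nil]
  | append_singleton t a ih =>
    rw [List.map_append, List.map_singleton, PySem.Set.ofList_append_singleton,
        PySem.Set.ofList_append_singleton, ih, PySem.Set.add_eq_ite, PySem.Set.add_eq_ite]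
    by_cases h : a ∈ PySem.Set.ofList t
    · have h' : f a ∈ (PySem.Set.ofList t).map f := List.mem_map_of_mem h
      simp [h, h']
    · have h' : f a ∉ (PySem.Set.ofList t).map f := by
        intro hm
        obtain ⟨b, hb, hfb⟩ := List.mem_map.mp hm
        exact h (hf hfb ▸ hb)
      simp [h, h']

theorem enumerate_map {α β : Type} (g : α → β) (xs : List α) (s : Int) :
    PySem.List.enumerate (xs.map g) s = (PySem.List.enumerate xs s).map (fun p => (p.1, g p.2)) := by
  induction xs generalizing s with
  | nil => rfl
  | cons x xs ih => simp [PySem.List.enumerate, ih]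

theorem filter_enumerate_positions {α : Type} [BEq α] [LawfulBEq α] [DecidableEq α] (xs : List α) (c : α) :
    ∀ i : Int, ((((PySem.List.enumerate xs i).map (fun p => (p.2, p.1))).filter
      (fun q => q.1 == c)).map (fun q => q.2)) = positionsFrom xs c i := by
  induction xs with
  | nil => intro i; simp [PySem.List.enumerate, positionsFrom]
  | cons x t ih =>
    intro i
    rw [PySem.List.enumerate_cons]
    by_cases h : x = c <;> simp [h, positionsFrom, ih (i + 1)]

theorem stepA_eq (d : PySem.Dict String (List Int)) (s : String) (i : Int) :
    (let d' := if d.contains s = false then d.insert s [] else d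
     d'.modify s [] (fun v => v ++ [i])) = d.modify s [] (fun v => v ++ [i]) := by
  cases h : d.contains s with
  | false =>
    simp only [ite_true, PySem.Dict.modify, PySem.Dict.getD_insert_self,
      PySem.Dict.insert_insert_self, PySem.Dict.getD_of_not_contains d ([] : List Int) h]
  | true => simp

theorem groupFold_items {α : Type} [BEq α] [LawfulBEq α] [DecidableEq α] (xs : List α) (i : Int) :
    ((PySem.List.enumerate xs i).foldl
      (fun (d : PySem.Dict α (List Int)) p => d.modify p.2 [] (fun v => v ++ [p.1]))
      PySem.Dict.empty).items
    = (PySem.Set.ofList xs).map (fun c => (c, positionsFrom xs c i)) := by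
  have hfold : (PySem.List.enumerate xs i).foldl
      (fun (d : PySem.Dict α (List Int)) p => d.modify p.2 [] (fun v => v ++ [p.1]))
      PySem.Dict.empty
      = ((PySem.List.enumerate xs i).map (fun p => (p.2, p.1))).foldl
        (fun (d : PySem.Dict α (List Int)) q => d.modify q.1 [] (fun v => v ++ [q.2]))
        PySem.Dict.empty := by
    rw [List.foldl_map]
  rw [hfold]
  have hnd : (((PySem.List.enumerate xs i).map (fun p => (p.2, p.1))).foldl
      (fun (d : PySem.Dict α (List Int)) q => d.modify q.1 [] (fun v => v ++ [q.2]))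
      PySem.Dict.empty).keys.Nodup :=
    PySem.Dict.nodup_keys_foldl_modify_key _ Prod.fst [] _ _ PySem.Dict.nodup_keys_empty
  rw [PySem.Dict.items_eq_map_keys _ hnd []]
  have hkeys : (((PySem.List.enumerate xs i).map (fun p => (p.2, p.1))).foldl
      (fun (d : PySem.Dict α (List Int)) q => d.modify q.1 [] (fun v => v ++ [q.2]))
      PySem.Dict.empty).keys = PySem.Set.ofList xs := by
    rw [PySem.Dict.keys_foldl_modify_key]
    rw [PySem.Dict.keys_empty, PySem.Set.update_nil_left]
    congr 1
    rw [List.map_map]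
    exact PySem.List.map_snd_enumerate xs i
  rw [hkeys]
  refine List.map_congr_left ?_
  intro c _
  have hg := PySem.Dict.getD_foldl_modify_append
    ((PySem.List.enumerate xs i).map (fun p => (p.2, p.1)))
    (PySem.Dict.empty : PySem.Dict α (List Int)) c
  rw [PySem.Dict.getD_empty] at hg
  simp only [List.nil_append] at hg
  rw [hg, filter_enumerate_positions xs c i]

theorem A_char (letters : String) (length : Int) :
    generate_char_dict letters length
    = (PySem.Set.ofList ((pyProduct letters.toList length.toNat [[]]).map String.ofList)).map
        (fun s => (s, positionsFrom ((pyProduct letters.toList length.toNat [[]]).map String.ofList) s 1)) := by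
  have hstep : (fun (d : PySem.Dict String (List Int)) (p : Int × List Char) =>
      let char := String.ofList p.2
      let d := if d.contains char = false then d.insert char [] else d
      d.modify char [] (fun v => v ++ [p.1]))
      = fun (d : PySem.Dict String (List Int)) p => d.modify (String.ofList p.2) [] (fun v => v ++ [p.1]) := by
    funext d p
    exact stepA_eq d (String.ofList p.2) p.1
  have hg := groupFold_items ((pyProduct letters.toList length.toNat [[]]).map String.ofList) 1
  rw [enumerate_map, List.foldl_map] at hg
  simp only [generate_char_dict]
  rw [hstep]
  exact hg

theorem pyProduct_swap (l : List Char) : ∀ (n : Nat) (ps : List (List Char)),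
    pyProduct l n (productStep l ps) = productStep l (pyProduct l n ps) := by
  intro n
  induction n with
  | zero => intro ps; rfl
  | succ n ih => intro ps; exact ih (productStep l ps)

theorem pyProduct_eq_rec (l : List Char) (n : Nat) : pyProduct l n [[]] = pyProductRec l n := by
  induction n with
  | zero => rfl
  | succ n ih =>
      show pyProduct l n (productStep l [[]]) = productStep l (pyProductRec l n)
      rw [pyProduct_swap, ih]

theorem extendAll_map_cons (l : List Char) (c : Char) (ps : List (List Char)) :
    extendAll l (ps.map (c :: ·)) = (extendAll l ps).map (c :: ·) := by
  simp [extendAll, List.map_flatMap, List.flatMap_map, List.map_map, Function.comp_def]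

theorem extendAll_flatMap (l l' : List Char) (g : Char → List (List Char)) :
    extendAll l (l'.flatMap g) = l'.flatMap (fun c => extendAll l (g c)) := by
  simp [extendAll, List.flatMap_assoc]

theorem pyProductRec_succ_back (l : List Char) : ∀ n, pyProductRec l (n + 1) = extendAll l (pyProductRec l n) := by
  intro n
  induction n with
  | zero => simp [pyProductRec, productStep, extendAll]; induction l <;> simp_all
  | succ n ih =>
      calc pyProductRec l (n + 2)
          = l.flatMap (fun c => (extendAll l (pyProductRec l n)).map (c :: ·)) := by
            show l.flatMap (fun c => (pyProductRec l (n + 1)).map (c :: ·)) = _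
            rw [ih]
        _ = l.flatMap (fun c => extendAll l ((pyProductRec l n).map (c :: ·))) := by
            simp [extendAll_map_cons]
        _ = extendAll l (l.flatMap (fun c => (pyProductRec l n).map (c :: ·))) :=
            (extendAll_flatMap l l _).symm
        _ = extendAll l (pyProductRec l (n + 1)) := rfl

theorem pyProduct_eq_prodRec (l : List Char) (n : Nat) :
    pyProduct l n [[]] = prodRec l n := by
  rw [pyProduct_eq_rec]
  induction n with
  | zero => rfl
  | succ n ih => rw [pyProductRec_succ_back, ih]; rfl

theorem posDict_items (l : List Char) :
    (posDict l).items = (PySem.Set.ofList l).map (fun c => (c, positionsFrom l c 0)) :=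
  groupFold_items l 0

theorem posDict_keys (l : List Char) : (posDict l).keys = PySem.Set.ofList l := by
  show (posDict l).items.map Prod.fst = _
  rw [posDict_items, List.map_map]
  simp [Function.comp_def]

theorem posDict_nodup_keys (l : List Char) : (posDict l).keys.Nodup := by
  rw [posDict_keys]; exact PySem.Set.nodup_ofList l

theorem posDict_getD (l : List Char) (c : Char) :
    (posDict l).getD c [] = positionsFrom l c 0 := by
  by_cases h : c ∈ l
  · have hmem : (c, positionsFrom l c 0) ∈ (posDict l).items := by
      rw [posDict_items]
      exact List.mem_map_of_mem ((PySem.Set.mem_ofList l c).mpr h)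
    exact PySem.Dict.getD_of_mem_items _ hmem (posDict_nodup_keys l) []
  · have hc : (posDict l).contains c = false := by
      rw [← Bool.not_eq_true, PySem.Dict.contains_iff_mem_keys _ c, posDict_keys]
      simp [PySem.Set.mem_ofList, h]
    rw [PySem.Dict.getD_of_not_contains _ _ hc, positionsFrom_not_mem l c h 0]

theorem positionsFrom_block (l : List Char) (x w : List Char) (c : Char) (i : Int) :
    positionsFrom (l.map (fun c' => x ++ [c'])) (w ++ [c]) i
    = if x = w then positionsFrom l c i else [] := by
  by_cases hxw : x = w
  · subst hxw
    rw [if_pos rfl]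
    exact positionsFrom_map_inj (fun c' => x ++ [c']) (fun a b h => by simpa using h) l c i
  · rw [if_neg hxw]
    refine positionsFrom_map_ne _ l _ ?_ i
    intro c' hc
    rw [← List.concat_eq_append, ← List.concat_eq_append] at hc
    exact hxw (List.concat_inj.mp hc).1

theorem positions_extendAll (l : List Char) (X : List (List Char)) (w : List Char) (c : Char) :
    positionsFrom (extendAll l X) (w ++ [c]) 0
    = (positionsFrom X w 0).flatMap
        (fun b => (positionsFrom l c 0).map (fun j => b * (l.length : Int) + j)) := by
  induction X with
  | nil => simp [extendAll, positionsFrom]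
  | cons x X ih =>
    have hext : extendAll l (x :: X) = (l.map fun c' => x ++ [c']) ++ extendAll l X := rfl
    rw [hext, positionsFrom_append, positionsFrom_block,
        positionsFrom_shift (extendAll l X), ih]
    show _ = ((if x = w then [0] else ([] : List Int)) ++ positionsFrom X w (0 + 1)).flatMap _
    rw [List.flatMap_append, positionsFrom_shift X w (0 + 1)]
    refine congrArg₂ (· ++ ·) ?_ ?_
    · split_ifs <;> simp
    · rw [List.map_flatMap, List.flatMap_map]
      congr 1
      funext b
      simp only [List.map_map, List.length_map]
      congr 1
      funext j
      simp only [Function.comp_apply]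
      push_cast
      ring

theorem flatMap_ite_skip {α β : Type} [BEq α] (L : List α) (x : α) (g : α → List β) :
    L.flatMap (fun w => if w == x then [] else g w)
    = (L.filter (fun w => !(w == x))).flatMap g := by
  induction L with
  | nil => rfl
  | cons a t ih =>
    by_cases h : a == x <;> simp [h, ih]

theorem filter_flatMap' {α β : Type} (L : List α) (g : α → List β) (p : β → Bool) :
    (L.flatMap g).filter p = L.flatMap (fun w => (g w).filter p) := by
  induction L with
  | nil => rfl
  | cons a t ih => simp [List.filter_append, ih]

theorem ofList_extendAll (l : List Char) (X : List (List Char)) :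
    PySem.Set.ofList (extendAll l X)
    = (PySem.Set.ofList X).flatMap (fun w => (PySem.Set.ofList l).map (fun c => w ++ [c])) := by
  induction X with
  | nil => rfl
  | cons x X ih =>
    have hinj : Function.Injective (fun c : Char => x ++ [c]) := fun a b h => by simpa using h
    have hblock : PySem.Set.ofList (l.map (fun c => x ++ [c]))
        = (PySem.Set.ofList l).map (fun c => x ++ [c]) := ofList_map_inj _ hinj l
    have hext : extendAll l (x :: X) = (l.map fun c => x ++ [c]) ++ extendAll l X := rfl
    rw [hext, PySem.Set.ofList_append, PySem.Set.update_eq_append_filter, hblock, ih,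
        PySem.Set.ofList_cons, List.flatMap_cons]
    congr 1
    rw [filter_flatMap']
    have hpt : ∀ w : List Char,
        ((PySem.Set.ofList l).map (fun c => w ++ [c])).filter
          (fun y => !(PySem.Set.contains ((PySem.Set.ofList l).map (fun c => x ++ [c])) y))
        = if w == x then [] else (PySem.Set.ofList l).map (fun c => w ++ [c]) := by
      intro w
      by_cases hwx : w = x
      · subst hwx
        rw [if_pos (by simp)]
        refine List.filter_eq_nil_iff.mpr ?_
        intro a ha
        simp only [PySem.Set.contains_eq_listContains]
        simp [ha]
      · rw [if_neg (by simpa using hwx)]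
        refine List.filter_eq_self.mpr ?_
        intro a ha
        obtain ⟨c', _, rfl⟩ := List.mem_map.mp ha
        have hnm : (w ++ [c']) ∉ (PySem.Set.ofList l).map (fun c => x ++ [c]) := by
          intro hm
          obtain ⟨c'', _, heq⟩ := List.mem_map.mp hm
          rw [← List.concat_eq_append, ← List.concat_eq_append] at heq
          exact hwx ((List.concat_inj.mp heq).1).symm
        simp [PySem.Set.contains_eq_listContains, hnm]
    simp only [hpt]
    rw [flatMap_ite_skip]
    rfl

theorem stepWords_canon (l : List Char) (X : List (List Char)) :
    stepWords (PySem.Set.ofList l) (posDict l) (l.length : Int) (canon X)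
    = canon (extendAll l X) := by
  unfold stepWords canon
  rw [ofList_extendAll, List.flatMap_map, List.map_flatMap]
  congr 1
  funext w
  simp only [List.map_map]
  congr 1
  funext c
  simp only [Function.comp_apply, posDict_getD, positions_extendAll]

theorem wordsLoop_swap (ks : List Char) (pos : PySem.Dict Char (List Int)) (k : Int) :
    ∀ (n : Nat) (ws : List (List Char × List Int)),
    wordsLoop ks pos k n (stepWords ks pos k ws) = stepWords ks pos k (wordsLoop ks pos k n ws) := by
  intro n
  induction n with
  | zero => intro ws; rfl
  | succ n ih => intro ws; exact ih (stepWords ks pos k ws)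

theorem wordsLoop_canon (l : List Char) (n : Nat) :
    wordsLoop (PySem.Set.ofList l) (posDict l) (l.length : Int) n [([], [0])]
    = canon (prodRec l n) := by
  induction n with
  | zero => rfl
  | succ n ih =>
    show wordsLoop _ _ _ n (stepWords _ _ _ [([], [0])]) = _
    rw [wordsLoop_swap, ih, stepWords_canon]
    rfl

theorem B_char (letters : String) (length : Int) :
    generate_char_dict_alt letters length
    = (canon (prodRec letters.toList length.toNat)).map
        (fun wb => (String.ofList wb.1, wb.2.map (fun b => b + 1))) := by
  simp only [generate_char_dict_alt]
  rw [posDict_keys, wordsLoop_canon]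
  have hfresh : ∀ wb ∈ canon (prodRec letters.toList length.toNat),
      (PySem.Dict.empty : PySem.Dict String (List Int)).contains (String.ofList wb.1) = false :=
    fun wb _ => PySem.Dict.contains_empty _
  have hnd : ((canon (prodRec letters.toList length.toNat)).map
      (fun wb => String.ofList wb.1)).Nodup := by
    unfold canon
    rw [List.map_map]
    exact (PySem.Set.nodup_ofList _).map (fun a b h => String.ofList_inj.mp h)
  rw [PySem.Dict.items_foldl_insert_fresh _ _ _ _ hfresh hnd]
  rfl

theorem generate_char_dict_spec' (letters : String) (length : Int) :
    generate_char_dict letters length = generate_char_dict_alt letters length := by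
  have hinj : Function.Injective String.ofList := fun a b h => String.ofList_inj.mp h
  rw [A_char, B_char, pyProduct_eq_prodRec]
  unfold canon
  rw [ofList_map_inj _ hinj, List.map_map, List.map_map]
  refine List.map_congr_left ?_
  intro w _
  simp only [Function.comp_apply]
  rw [positionsFrom_map_inj _ hinj, positionsFrom_shift _ _ 1]

-- ===== VERDICT (by name: the statements are the Claim_ definitions above) =====
theorem generate_char_dict_spec : Claim_equal_generate_char_dict := by
  intro letters length _ _
  unfold Spec_generate_char_dict
  exact generate_char_dict_spec' letters length
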